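-- pv_equiv track=rewrite | github.com/kylefoley76/german_language_analyzer | general/very_general_functions.py | ideal_amount
-- ===== SOURCE A (Python) =====
-- def ideal_amount(lst, num):
--     dct = {}
--     acceptable = [x for x in range(num - 2, num + 5)]
--     c = 2
--     found = False
--     while True:
--         rem = len(lst) % c
--         sz = len(lst) // c
--         if sz in acceptable:
--             found = True
--             if rem == 0:
--                 return c
--             else:
--                 dct[rem] = c
--         elif sz not in acceptable and found:
--             break
--         c += 1
--
--     highest = max(list(dct.keys()))
--     return dct[highest]
-- ===== SOURCE B (Python) =====
-- def ideal_amount(lst, num):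
--     n = len(lst)
--     # n//c is an acceptable size (num-2..num+4) exactly for c >= lo; for num >= 3
--     # also only up to hi = n//(num-2), for num <= 2 for every c >= lo.
--     lo = max(2, n // (num + 5) + 1)
--     hi = n // (num - 2) if num >= 3 else max(n, 2)
--     best_rem, best_c = -1, 0
--     for c in range(lo, hi + 1):
--         rem = n % c
--         if rem == 0:
--             return c
--         if rem >= best_rem:
--             best_rem, best_c = rem, c
--     return best_c
-- ===== Notes on version B (the rewrite author's own statement) =====
-- stated objective: alternative
-- what changed: B computes the window of acceptable group counts in closed form from len(lst) and num and scans only that window with a (best_rem, best_c) pair, instead of A's scan of every count from 2 upward with a remainder-keyed dict and a final max over its keys.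
import Mathlib
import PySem

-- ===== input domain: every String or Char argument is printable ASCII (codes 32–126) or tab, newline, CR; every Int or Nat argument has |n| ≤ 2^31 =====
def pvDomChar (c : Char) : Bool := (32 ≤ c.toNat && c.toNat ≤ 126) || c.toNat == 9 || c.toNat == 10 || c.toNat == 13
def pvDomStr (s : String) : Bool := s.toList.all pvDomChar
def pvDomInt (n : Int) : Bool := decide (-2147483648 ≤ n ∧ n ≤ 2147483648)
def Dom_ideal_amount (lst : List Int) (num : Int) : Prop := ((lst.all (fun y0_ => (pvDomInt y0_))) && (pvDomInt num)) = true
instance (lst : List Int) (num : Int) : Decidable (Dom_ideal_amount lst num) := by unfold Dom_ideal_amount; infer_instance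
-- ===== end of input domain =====

-- B replaces A's scan of every candidate count c = 2,3,… with a closed-form computation of the
-- window of acceptable counts and a dict-free best-remainder scan of that window only.

-- ===== PORT A =====
-- A's 'while True' loop, ported with fuel (lst.length + 2 iterations suffice on every input
-- Pre_ideal_amount admits; outside Pre_ the Python loops forever and nothing is claimed).
def idealLoopA (n : Int) (acceptable : List Int) (dct : PySem.Dict Int Int) (c : Int)
    (found : Bool) : Nat → Int
  | 0 => 0  -- fuel exhausted: unreachable under Pre_ideal_amount
  | fuel + 1 =>
    let rem := PySem.Int.mod n c
    let sz := PySem.Int.floordiv n c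
    if sz ∈ acceptable then
      if rem = 0 then c
      else idealLoopA n acceptable (dct.insert rem c) (c + 1) true fuel
    else if found then
      -- break, then:  highest = max(list(dct.keys())); return dct[highest]
      match PySem.List.max? dct.keys (fun x => x) with
      | some highest => (dct.get? highest).getD 0  -- dct[highest]; the key is present (max of keys)
      | none => 0  -- Python's max([]) raises ValueError; unreachable under Pre_ideal_amount
    else idealLoopA n acceptable dct (c + 1) found fuel

def ideal_amount (lst : List Int) (num : Int) : Int :=
  let acceptable := PySem.List.pyRange (num - 2) (num + 5)
  idealLoopA (PySem.List.len lst) acceptable PySem.Dict.empty 2 false (lst.length + 2)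

-- ===== PORT B =====
-- 'for c in range(lo, hi + 1)' with early return and a (best_rem, best_c) accumulator.
def idealLoopB (n : Int) (hi : Int) (c : Int) (bestRem : Int) (bestC : Int) : Int :=
  if h : hi < c then bestC
  else
    let rem := PySem.Int.mod n c
    if rem = 0 then c
    else if bestRem ≤ rem then idealLoopB n hi (c + 1) rem c
    else idealLoopB n hi (c + 1) bestRem bestC
termination_by (hi + 1 - c).toNat
decreasing_by all_goals simp at h; omega

def ideal_amount_alt (lst : List Int) (num : Int) : Int :=
  let n := PySem.List.len lst
  let lo := max 2 (PySem.Int.floordiv n (num + 5) + 1)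
  let hi := if 3 ≤ num then PySem.Int.floordiv n (num - 2) else max n 2
  idealLoopB n hi lo (-1) 0

-- ===== PRECONDITION & SPEC =====
-- Pre_ excludes exactly the inputs on which A loops forever: for num ≥ 3 the window of counts c
-- with len//c acceptable must be nonempty; for -4 ≤ num ≤ 2 the list must be empty or some count
-- in the (upward-unbounded) window must divide len exactly; for num ≤ -5 A always diverges.
def Pre_ideal_amount (lst : List Int) (num : Int) : Prop :=
  (3 ≤ num ∧
    max 2 (PySem.Int.floordiv (PySem.List.len lst) (num + 5) + 1)
      ≤ PySem.Int.floordiv (PySem.List.len lst) (num - 2)) ∨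
  (-4 ≤ num ∧ num ≤ 2 ∧
    (PySem.List.len lst = 0 ∨
      (2 ≤ PySem.List.len lst ∧
        ∃ c ∈ PySem.List.pyRange
            (max 2 (PySem.Int.floordiv (PySem.List.len lst) (num + 5) + 1))
            (PySem.List.len lst + 1),
          PySem.Int.mod (PySem.List.len lst) c = 0)))
instance (lst : List Int) (num : Int) : Decidable (Pre_ideal_amount lst num) := by
  unfold Pre_ideal_amount; infer_instance

def pvWitness_ideal_amount : List Int × Int := ([0, 0, 0, 0, 0, 0, 0, 0, 0, 0], 3)

def Spec_ideal_amount (lst : List Int) (num : Int) (out : Int) : Prop := out = ideal_amount_alt lst num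
instance (lst : List Int) (num : Int) (out : Int) : Decidable (Spec_ideal_amount lst num out) := by
  unfold Spec_ideal_amount; infer_instance

-- ===== CLAIM (what is proved, stated in full; the proofs are below) =====
def Claim_equal_ideal_amount : Prop := ∀ (lst : List Int) (num : Int), Dom_ideal_amount lst num → Pre_ideal_amount lst num → Spec_ideal_amount lst num (ideal_amount lst num)

-- ===== LEMMAS AND PROOFS =====

-- For c ≥ 2, len//c is an acceptable size iff c lies in the closed-form window [lo, hi].
theorem window_mem (n num c : Int) (hc : 2 ≤ c) (hnum : 3 ≤ num) :
    (PySem.Int.floordiv n c ∈ PySem.List.pyRange (num - 2) (num + 5)) ↔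
      (max 2 (PySem.Int.floordiv n (num + 5) + 1) ≤ c ∧ c ≤ PySem.Int.floordiv n (num - 2)) := by
  rw [PySem.List.mem_pyRange_one, max_le_iff]
  rw [PySem.Int.le_floordiv_iff_mul_le (show (0:Int) < c by omega),
      PySem.Int.floordiv_lt_iff_lt_mul (show (0:Int) < c by omega),
      PySem.Int.le_floordiv_iff_mul_le (show (0:Int) < num - 2 by omega),
      show (PySem.Int.floordiv n (num + 5) + 1 ≤ c) ↔ (PySem.Int.floordiv n (num + 5) < c) by omega,
      PySem.Int.floordiv_lt_iff_lt_mul (show (0:Int) < num + 5 by omega)]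
  rw [mul_comm c (num - 2), mul_comm c (num + 5)]
  tauto

-- Window phase: once found, with the dict summarised by (br, bc) = (max key, its value),
-- A's remaining loop computes exactly B's scan.
theorem window_run (n num : Int) (hnum : 3 ≤ num)
    (lo hi : Int) (hlo : lo = max 2 (PySem.Int.floordiv n (num + 5) + 1))
    (hhi : hi = PySem.Int.floordiv n (num - 2)) :
    ∀ (fuel : Nat) (c : Int) (d : PySem.Dict Int Int) (br bc : Int),
      lo ≤ c → c ≤ hi + 1 → (hi + 2 - c).toNat ≤ fuel →
      br ∈ d.keys → (∀ k ∈ d.keys, k ≤ br) → d.get? br = some bc →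
      idealLoopA n (PySem.List.pyRange (num - 2) (num + 5)) d c true fuel =
        idealLoopB n hi c br bc := by
  intro fuel
  induction fuel with
  | zero => intro c d br bc h1 h2 h3; omega
  | succ fuel ih =>
    intro c d br bc hc1 hc2 hfuel hmem hmax hget
    have hc0 : 2 ≤ c := le_trans (hlo ▸ le_max_left 2 _) hc1
    rw [idealLoopA]
    by_cases hwin : c ≤ hi
    · have hin : PySem.Int.floordiv n c ∈ PySem.List.pyRange (num - 2) (num + 5) :=
        (window_mem n num c hc0 hnum).2 ⟨hlo ▸ hc1, hhi ▸ hwin⟩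
      rw [idealLoopB]
      simp only [hin, if_pos, not_lt.mpr hwin]
      by_cases hrem : PySem.Int.mod n c = 0
      · simp [hrem]
      · simp only [hrem, if_false]
        have hrnn : 0 ≤ PySem.Int.mod n c := PySem.Int.mod_nonneg n (by omega)
        set rem := PySem.Int.mod n c with hremdef
        by_cases hbr : br ≤ rem
        · rw [if_pos hbr]
          apply ih (c + 1) (d.insert rem c) rem c (by omega) (by omega) (by omega)
          · exact (PySem.Dict.mem_keys_insert d rem rem c).2 (Or.inl rfl)
          · intro k hk
            rcases (PySem.Dict.mem_keys_insert d rem k c).1 hk with h | h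
            · omega
            · exact le_trans (hmax k h) hbr
          · exact PySem.Dict.get?_insert_self d rem c
        · rw [if_neg hbr]
          apply ih (c + 1) (d.insert rem c) br bc (by omega) (by omega) (by omega)
          · exact (PySem.Dict.mem_keys_insert d rem br c).2 (Or.inr hmem)
          · intro k hk
            rcases (PySem.Dict.mem_keys_insert d rem k c).1 hk with h | h
            · omega
            · exact hmax k h
          · rw [PySem.Dict.get?_insert_of_ne d c (by omega)]
            exact hget
    · -- c = hi + 1: A breaks, B's range is exhausted
      have hnin : PySem.Int.floordiv n c ∉ PySem.List.pyRange (num - 2) (num + 5) := by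
        intro hin
        have := (window_mem n num c hc0 hnum).1 hin
        omega
      rw [idealLoopB]
      simp only [hnin, if_false, if_true, dif_pos (show hi < c by omega)]
      cases hmx : PySem.List.max? d.keys (fun x => x) with
      | none =>
        exfalso
        rw [PySem.List.max?_eq_none_iff] at hmx
        rw [hmx] at hmem
        exact absurd hmem (List.not_mem_nil)
      | some m =>
        have hm1 : m ∈ d.keys := PySem.List.max?_mem hmx
        have hm2 : br ≤ m := PySem.List.max?_isMax hmx br hmem
        have hm3 : m ≤ br := hmax m hm1
        have : m = br := le_antisymm hm3 hm2
        simp [this, hget]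

-- Pre-window phase: below lo nothing is acceptable, found stays false, the dict stays empty.
theorem pre_run (n num : Int) (hnum : 3 ≤ num)
    (lo hi : Int) (hlo : lo = max 2 (PySem.Int.floordiv n (num + 5) + 1))
    (hhi : hi = PySem.Int.floordiv n (num - 2)) (hwin : lo ≤ hi) :
    ∀ (fuel : Nat) (c : Int), 2 ≤ c → c ≤ lo → (hi + 2 - c).toNat ≤ fuel →
      idealLoopA n (PySem.List.pyRange (num - 2) (num + 5)) PySem.Dict.empty c false fuel =
        idealLoopB n hi lo (-1) 0 := by
  intro fuel
  induction fuel with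
  | zero => intro c h1 h2 h3; omega
  | succ fuel ih =>
    intro c hc2 hclo hfuel
    by_cases hceq : c = lo
    · -- first window iteration: either an exact divisor returns c, or found becomes true
      subst hceq
      have hin : PySem.Int.floordiv n c ∈ PySem.List.pyRange (num - 2) (num + 5) :=
        (window_mem n num c hc2 hnum).2 ⟨le_of_eq hlo.symm, hhi ▸ hwin⟩
      rw [idealLoopA, idealLoopB]
      simp only [hin, if_pos, dif_neg (not_lt.mpr hwin)]
      by_cases hrem : PySem.Int.mod n c = 0
      · simp [hrem]
      · have hrnn : 0 ≤ PySem.Int.mod n c := PySem.Int.mod_nonneg n (by omega)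
        simp only [hrem, if_false, if_pos (show (-1:Int) ≤ PySem.Int.mod n c by omega)]
        apply window_run n num hnum c hi hlo hhi fuel (c + 1) _ _ _ (by omega) (by omega)
          (by omega)
        · exact (PySem.Dict.mem_keys_insert PySem.Dict.empty _ _ c).2 (Or.inl rfl)
        · intro k hk
          rcases (PySem.Dict.mem_keys_insert PySem.Dict.empty _ k c).1 hk with h | h
          · omega
          · simp [PySem.Dict.keys_empty] at h
        · exact PySem.Dict.get?_insert_self PySem.Dict.empty _ c
    · -- c < lo: the size is still too large, skip
      have hclt : c < lo := lt_of_le_of_ne hclo hceq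
      have hnin : PySem.Int.floordiv n c ∉ PySem.List.pyRange (num - 2) (num + 5) := by
        intro hin
        have := (window_mem n num c hc2 hnum).1 hin
        omega
      rw [idealLoopA]
      simp only [hnin, if_false, Bool.false_eq_true]
      exact ih (c + 1) (by omega) (by omega) (by omega)

-- For -4 ≤ num ≤ 2 and c ≥ 2 the size len//c is acceptable exactly from lo on (no upper bound).
theorem window_mem_low (n num c : Int) (hn : 0 ≤ n) (hc : 2 ≤ c) (h4 : -4 ≤ num) (h2 : num ≤ 2) :
    (PySem.Int.floordiv n c ∈ PySem.List.pyRange (num - 2) (num + 5)) ↔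
      max 2 (PySem.Int.floordiv n (num + 5) + 1) ≤ c := by
  have hlow : num - 2 ≤ PySem.Int.floordiv n c :=
    (PySem.Int.le_floordiv_iff_mul_le (show (0:Int) < c by omega)).2
      (le_trans (mul_nonpos_of_nonpos_of_nonneg (by omega) (by omega)) hn)
  rw [PySem.List.mem_pyRange_one, max_le_iff]
  rw [PySem.Int.floordiv_lt_iff_lt_mul (show (0:Int) < c by omega),
      show (PySem.Int.floordiv n (num + 5) + 1 ≤ c) ↔ (PySem.Int.floordiv n (num + 5) < c) by omega,
      PySem.Int.floordiv_lt_iff_lt_mul (show (0:Int) < num + 5 by omega),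
      mul_comm c (num + 5)]
  tauto

-- Low region (-4 ≤ num ≤ 2), inside the window: both loops return the first exact divisor;
-- A's dict and B's best pair are both irrelevant, so the two runs stay in lock-step.
theorem run_low (n num : Int) (hn : 0 ≤ n) (h4 : -4 ≤ num) (h2 : num ≤ 2)
    (lo hi : Int) (hlo : lo = max 2 (PySem.Int.floordiv n (num + 5) + 1)) (hhi : hi = max n 2) :
    ∀ (fuel : Nat) (c : Int) (d : PySem.Dict Int Int) (found : Bool) (br bc : Int),
      lo ≤ c → (∃ e, c ≤ e ∧ e ≤ n ∧ PySem.Int.mod n e = 0) → (n + 2 - c).toNat ≤ fuel →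
      idealLoopA n (PySem.List.pyRange (num - 2) (num + 5)) d c found fuel =
        idealLoopB n hi c br bc := by
  intro fuel
  induction fuel with
  | zero =>
    intro c d found br bc _ he hf
    obtain ⟨e, h1, h2, _⟩ := he
    omega
  | succ fuel ih =>
    intro c d found br bc hc hex hfuel
    obtain ⟨e, hce, hen, hemod⟩ := hex
    have hc2 : 2 ≤ c := le_trans (hlo ▸ le_max_left 2 _) hc
    have hin : PySem.Int.floordiv n c ∈ PySem.List.pyRange (num - 2) (num + 5) :=
      (window_mem_low n num c hn hc2 h4 h2).2 (hlo ▸ hc)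
    rw [idealLoopA, idealLoopB]
    simp only [hin, if_pos, dif_neg (show ¬ hi < c by omega)]
    by_cases hrem : PySem.Int.mod n c = 0
    · simp [hrem]
    · have hec : c + 1 ≤ e := by
        rcases lt_or_eq_of_le hce with h | h
        · omega
        · exact absurd (h ▸ hemod) hrem
      simp only [hrem, if_false]
      split_ifs <;>
        exact ih (c + 1) _ _ _ _ (by omega) ⟨e, by omega, hen, hemod⟩ (by omega)

-- Low region, below the window: nothing is acceptable, found stays false.
theorem pre_run_low (n num : Int) (hn : 0 ≤ n) (h4 : -4 ≤ num) (h2 : num ≤ 2)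
    (lo hi : Int) (hlo : lo = max 2 (PySem.Int.floordiv n (num + 5) + 1)) (hhi : hi = max n 2) :
    ∀ (fuel : Nat) (c : Int), 2 ≤ c → c ≤ lo →
      (∃ e, lo ≤ e ∧ e ≤ n ∧ PySem.Int.mod n e = 0) → (n + 2 - c).toNat ≤ fuel →
      idealLoopA n (PySem.List.pyRange (num - 2) (num + 5)) PySem.Dict.empty c false fuel =
        idealLoopB n hi lo (-1) 0 := by
  intro fuel
  induction fuel with
  | zero =>
    intro c _ hclo he hf
    obtain ⟨e, h1, h2, _⟩ := he
    omega
  | succ fuel ih =>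
    intro c hc2 hclo hex hfuel
    by_cases hceq : c = lo
    · subst hceq
      exact run_low n num hn h4 h2 c hi hlo hhi (fuel + 1) c PySem.Dict.empty false (-1) 0
        le_rfl hex hfuel
    · have hclt : c < lo := lt_of_le_of_ne hclo hceq
      have hnin : PySem.Int.floordiv n c ∉ PySem.List.pyRange (num - 2) (num + 5) := by
        intro hin
        have := (window_mem_low n num c hn hc2 h4 h2).1 hin
        omega
      rw [idealLoopA]
      simp only [hnin, if_false, Bool.false_eq_true]
      obtain ⟨e, h1, h2', h3⟩ := hex
      exact ih (c + 1) (by omega) (by omega) ⟨e, h1, h2', h3⟩ (by omega)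

-- ===== VERDICT (by name: the statement is the Claim_ definition above) =====
theorem ideal_amount_spec : Claim_equal_ideal_amount := by
  intro lst num _ hpre
  rcases hpre with ⟨hnum, hwin⟩ | ⟨h4, h2, hcase⟩
  case inr =>
    unfold Spec_ideal_amount ideal_amount ideal_amount_alt
    simp only [if_neg (show ¬ 3 ≤ num by omega)]
    rcases hcase with hzero | ⟨hlen, hdiv⟩
    · -- empty list: both sides return 2
      have hnil : lst = [] := by
        rw [PySem.List.len_eq] at hzero
        exact List.length_eq_zero_iff.1 (by omega)
      subst hnil
      simp only [PySem.List.len_eq, List.length_nil, Int.natCast_zero]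
      have hf0 : PySem.Int.floordiv (0:Int) (num + 5) = 0 := by
        rw [PySem.Int.floordiv_eq_ediv_of_pos (show (0:Int) < num + 5 by omega)]
        simp
      rw [show (0:Nat) + 2 = 1 + 1 from rfl, idealLoopA, idealLoopB]
      simp [hf0]
      intro h
      exact absurd (h h2) (by omega)
    · -- a count in the window divides len(lst) exactly
      set n : Int := PySem.List.len lst with hn
      have hn0 : 0 ≤ n := by rw [hn, PySem.List.len_eq]; positivity
      obtain ⟨e, hemem, hemod⟩ := hdiv
      rw [PySem.List.mem_pyRange_one] at hemem
      have hfuel : (n + 2 - 2).toNat ≤ lst.length + 2 := by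
        have : n = (lst.length : Int) := by rw [hn, PySem.List.len_eq]
        omega
      exact pre_run_low n num hn0 h4 h2 _ _ rfl rfl (lst.length + 2) 2 le_rfl (le_max_left 2 _)
        ⟨e, hemem.1, by omega, hemod⟩ hfuel
  case inl =>
  unfold Spec_ideal_amount ideal_amount ideal_amount_alt
  simp only [if_pos hnum]
  set n : Int := PySem.List.len lst with hn
  have hn0 : 0 ≤ n := by rw [hn, PySem.List.len_eq]; positivity
  set lo : Int := max 2 (PySem.Int.floordiv n (num + 5) + 1) with hlo
  set hi : Int := PySem.Int.floordiv n (num - 2) with hhi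
  have hhin : hi ≤ n := by
    rw [hhi, PySem.Int.floordiv_eq_ediv_of_pos (show (0:Int) < num - 2 by omega)]
    exact Int.ediv_le_self _ hn0
  have hfuel : (hi + 2 - 2).toNat ≤ lst.length + 2 := by
    have : n = (lst.length : Int) := by rw [hn, PySem.List.len_eq]
    omega
  exact pre_run n num hnum lo hi hlo hhi hwin (lst.length + 2) 2 le_rfl (le_max_left 2 _) hfuel
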